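-- pv_equiv track=rewrite | github.com/jasna-pt/my-projects | python/func.py | result
-- ===== SOURCE A (Python) =====
-- def result(num1,num2):
--     even=[]
--     count1=0
--     count=0
--     odd=[]
--     for i in range(num1,num2):
--         if i%2==0:
--             even.append(i)
--             count+=1
--         else:
--             odd.append(i)
--             count1+=1
--
--     return even,odd,count1,count
-- ===== SOURCE B (Python) =====
-- def result(num1, num2):
--     first_even = num1 if num1 % 2 == 0 else num1 + 1
--     first_odd = num1 if num1 % 2 == 1 else num1 + 1
--     even = list(range(first_even, num2, 2))
--     odd = list(range(first_odd, num2, 2))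
--     return even, odd, len(odd), len(even)
-- ===== Notes on version B (the rewrite author's own statement) =====
-- stated objective: simpler
-- what changed: Replaces the per-element parity branch loop with two strided range(first, num2, 2) progressions, deriving the counts as list lengths instead of incrementing accumulators.
import Mathlib
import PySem

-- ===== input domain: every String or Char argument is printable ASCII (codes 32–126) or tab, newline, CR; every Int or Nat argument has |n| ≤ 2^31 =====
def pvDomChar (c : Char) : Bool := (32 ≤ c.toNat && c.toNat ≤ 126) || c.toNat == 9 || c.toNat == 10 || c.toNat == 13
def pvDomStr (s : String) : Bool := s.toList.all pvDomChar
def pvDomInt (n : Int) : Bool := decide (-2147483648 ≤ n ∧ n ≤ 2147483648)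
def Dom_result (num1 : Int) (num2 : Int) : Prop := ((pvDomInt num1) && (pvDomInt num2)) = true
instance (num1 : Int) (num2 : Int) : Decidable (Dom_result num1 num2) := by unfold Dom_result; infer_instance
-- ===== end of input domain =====

-- B replaces A's per-element parity branch with two strided ranges and derives the counts as lengths (simpler, no loop).


-- ===== PORT A =====
-- loop body of A: state is (even, odd, count1, count)
def pvStepA (st : List Int × List Int × Int × Int) (i : Int) : List Int × List Int × Int × Int :=
  if PySem.Int.mod i 2 == 0 then (st.1 ++ [i], st.2.1, st.2.2.1, st.2.2.2 + 1)
  else (st.1, st.2.1 ++ [i], st.2.2.1 + 1, st.2.2.2)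

def result (num1 : Int) (num2 : Int) : List Int × List Int × Int × Int :=
  (PySem.List.pyRange num1 num2 1).foldl pvStepA ([], [], 0, 0)

-- ===== PORT B =====
def result_alt (num1 : Int) (num2 : Int) : List Int × List Int × Int × Int :=
  let firstEven := if PySem.Int.mod num1 2 == 0 then num1 else num1 + 1
  let firstOdd := if PySem.Int.mod num1 2 == 1 then num1 else num1 + 1
  let even := PySem.List.pyRange firstEven num2 2
  let odd := PySem.List.pyRange firstOdd num2 2
  (even, odd, (odd.length : Int), (even.length : Int))

-- ===== PRECONDITION & SPEC =====
def Spec_result (num1 : Int) (num2 : Int) (out : List Int × List Int × Int × Int) : Prop := out = result_alt num1 num2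
instance (num1 : Int) (num2 : Int) (out : List Int × List Int × Int × Int) : Decidable (Spec_result num1 num2 out) := by unfold Spec_result; infer_instance

-- ===== CLAIM (what is proved, stated in full; the proofs are below) =====
def Claim_equal_result : Prop := ∀ (num1 : Int) (num2 : Int), Dom_result num1 num2 → Spec_result num1 num2 (result num1 num2)

-- ===== LEMMAS AND PROOFS =====

theorem pv_fmod_two (i : Int) : i.fmod 2 = i % 2 := by
  simp [Int.fmod_eq_emod]

-- step-2 range: empty and cons characterisations
theorem pv_pyRange2_nil (a b : Int) (h : b ≤ a) : PySem.List.pyRange a b 2 = [] := by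
  rw [PySem.List.pyRange_of_pos a b (by norm_num)]
  simp [show ¬ a < b by omega]

theorem pv_pyRange2_cons (a b : Int) (h : a < b) :
    PySem.List.pyRange a b 2 = a :: PySem.List.pyRange (a + 2) b 2 := by
  rw [PySem.List.pyRange_of_pos a b (by norm_num),
      PySem.List.pyRange_of_pos (a + 2) b (by norm_num)]
  have hcount : (if a < b then ((b - a + 2 - 1) / 2).toNat else 0)
      = (if a + 2 < b then ((b - (a + 2) + 2 - 1) / 2).toNat else 0) + 1 := by
    split_ifs <;> omega
  rw [hcount, List.range_succ_eq_map, List.map_cons, List.map_map]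
  refine congrArg₂ _ (by ring) (List.map_congr_left ?_)
  intro k _
  simp only [Function.comp, Nat.succ_eq_add_one]
  push_cast
  ring

-- the strided range starting at the first element with parity r equals the filtered unit range
theorem pv_strided_eq_filter (r : Int) (hr : r = 0 ∨ r = 1) :
    ∀ (n : Nat) (a b : Int), (b - a).toNat = n →
    PySem.List.pyRange (if a % 2 = r then a else a + 1) b 2
      = (PySem.List.pyRange a b 1).filter (fun i => i % 2 == r) := by
  intro n
  induction n with
  | zero =>
    intro a b hn
    have hba : b ≤ a := by omega
    rw [PySem.List.pyRange_one_eq_nil hba, List.filter_nil]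
    split_ifs <;> exact pv_pyRange2_nil _ _ (by omega)
  | succ m ih =>
    intro a b hn
    have hab : a < b := by omega
    rw [PySem.List.pyRange_one_cons hab, List.filter_cons]
    by_cases hpar : a % 2 = r
    · have h1 : ¬ (a + 1) % 2 = r := by omega
      have := ih (a + 1) b (by omega)
      rw [if_neg h1] at this
      rw [show a + 1 + 1 = a + 2 by ring] at this
      simp only [hpar, if_pos trivial, beq_iff_eq]
      rw [pv_pyRange2_cons a b hab, this]
    · have h1 : (a + 1) % 2 = r := by omega
      have := ih (a + 1) b (by omega)
      rw [if_pos h1] at this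
      rw [if_neg hpar, this]
      simp [hpar]

-- A's loop characterised: it appends the parity filters and counts their lengths
theorem pv_foldA_spec (L : List Int) (e o : List Int) (c1 c : Int) :
    L.foldl pvStepA (e, o, c1, c)
      = (e ++ L.filter (fun i => i % 2 == 0),
         o ++ L.filter (fun i => !(i % 2 == 0)),
         c1 + ((L.filter (fun i => !(i % 2 == 0))).length : Int),
         c + ((L.filter (fun i => i % 2 == 0)).length : Int)) := by
  induction L generalizing e o c1 c with
  | nil => simp
  | cons x xs ih =>
    by_cases h : x % 2 = 0
    · simp only [List.foldl_cons, pvStepA, PySem.Int.mod, pv_fmod_two, h, List.filter_cons]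
      rw [ih]
      simp
      omega
    · simp only [List.foldl_cons, pvStepA, PySem.Int.mod, pv_fmod_two, List.filter_cons]
      rw [if_neg (by simpa using h), ih]
      simp [h]
      omega

theorem pv_odd_filter (L : List Int) :
    L.filter (fun i => !(i % 2 == 0)) = L.filter (fun i => i % 2 == 1) := by
  refine List.filter_congr ?_
  intro x _
  have h : x % 2 = 0 ∨ x % 2 = 1 := by omega
  rcases h with h | h <;> simp [h]

-- ===== VERDICT (by name: the statement is the Claim_ definition above) =====
theorem result_spec : Claim_equal_result := by
  intro num1 num2 _
  unfold Spec_result result result_alt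
  rw [pv_foldA_spec]
  have he := pv_strided_eq_filter 0 (Or.inl rfl) (num2 - num1).toNat num1 num2 rfl
  have ho := pv_strided_eq_filter 1 (Or.inr rfl) (num2 - num1).toNat num1 num2 rfl
  simp only [PySem.Int.mod, pv_fmod_two, pv_odd_filter]
  simp only [← he, ← ho]
  split_ifs <;> simp_all <;> omega
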